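-- pv_equiv track=rewrite | github.com/magnocarvalho/beecrowd-py | 1027.py | compare_points
-- ===== SOURCE A (Python) =====
-- def compare_points(x1, x2):
--     # If the first list has elements and the second one doesn't, return 1.
--     if x1 and not x2:
--         return 1
--     # If the first list is empty, return 0.
--     if not x1:
--         return 0
--     # If the first element of both lists are equal, recursively compare the remaining elements
--     # with additional count of 1.
--     if x1[0] == x2[0]:
--         return 1 + compare_points(x2[1:], x1[1:])
--     # If the first element of the first list is less than that of the second list,
--     # continue recursively comparing, moving forward in the first list.
--     if x1[0] < x2[0]:
--         return 1 + compare_points(x2, x1[1:])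
--     # Otherwise, skip the first element of the second list and keep comparing.
--     return compare_points(x1, x2[1:])
-- ===== SOURCE B (Python) =====
-- def compare_points(x1, x2):
--     # Iterative two-pointer traversal with a role swap, replacing A's recursive slicing.
--     a, b = x1, x2
--     i, j, count = 0, 0, 0
--     while True:
--         if i < len(a) and j >= len(b):
--             return count + 1
--         if i >= len(a):
--             return count
--         if a[i] == b[j]:
--             a, b, i, j, count = b, a, j + 1, i + 1, count + 1
--         elif a[i] < b[j]:
--             a, b, i, j, count = b, a, j, i + 1, count + 1
--         else:
--             j += 1
-- ===== Notes on version B (the rewrite author's own statement) =====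
-- stated objective: faster
-- what changed: Replaces A's recursive calls on list slices (each slice copies the tail) with an iterative two-pointer loop over the original lists using indices and a role swap.
import Mathlib
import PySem

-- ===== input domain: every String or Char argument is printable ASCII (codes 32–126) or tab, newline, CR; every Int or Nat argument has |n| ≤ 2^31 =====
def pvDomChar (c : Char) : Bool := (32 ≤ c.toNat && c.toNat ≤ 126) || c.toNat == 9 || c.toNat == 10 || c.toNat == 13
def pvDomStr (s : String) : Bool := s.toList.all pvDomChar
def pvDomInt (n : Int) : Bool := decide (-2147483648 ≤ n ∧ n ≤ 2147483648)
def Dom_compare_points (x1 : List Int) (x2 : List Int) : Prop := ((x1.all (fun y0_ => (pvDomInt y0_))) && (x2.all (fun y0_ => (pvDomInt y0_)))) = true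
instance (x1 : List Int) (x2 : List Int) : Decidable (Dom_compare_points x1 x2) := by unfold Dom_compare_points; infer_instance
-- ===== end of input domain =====

-- B: iterative two-pointer loop with indices and a role swap, replacing A's recursive list-slicing (faster in a timing run).
-- ===== PORT A =====
def compare_points : List Int → List Int → Int
  | _ :: _, [] => 1
  | [], _ => 0
  | a :: as, b :: bs =>
      if a = b then 1 + compare_points bs as
      else if a < b then 1 + compare_points (b :: bs) as
      else compare_points (a :: as) bs
termination_by x1 x2 => x1.length + x2.length
decreasing_by all_goals (simp only [List.length_cons]; omega)

-- ===== PORT B =====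
def cpAltLoop (a b : List Int) (i j : Nat) (count : Int) : Int :=
  if i < a.length ∧ ¬ j < b.length then count + 1
  else if hi : ¬ i < a.length then count
  else if hj : ¬ j < b.length then count + 1  -- unreachable; keeps the dite total
  else if a.getD i 0 = b.getD j 0 then cpAltLoop b a (j + 1) (i + 1) (count + 1)
  else if a.getD i 0 < b.getD j 0 then cpAltLoop b a j (i + 1) (count + 1)
  else cpAltLoop a b i (j + 1) count
termination_by (a.length - i) + (b.length - j)
decreasing_by all_goals omega

def compare_points_alt (x1 : List Int) (x2 : List Int) : Int := cpAltLoop x1 x2 0 0 0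

-- ===== PRECONDITION & SPEC =====
def Spec_compare_points (x1 : List Int) (x2 : List Int) (out : Int) : Prop := out = compare_points_alt x1 x2
instance (x1 : List Int) (x2 : List Int) (out : Int) : Decidable (Spec_compare_points x1 x2 out) := by unfold Spec_compare_points; infer_instance

-- ===== CLAIM (what is proved, stated in full; the proofs are below) =====
def Claim_equal_compare_points : Prop := ∀ (x1 : List Int) (x2 : List Int), Dom_compare_points x1 x2 → Spec_compare_points x1 x2 (compare_points x1 x2)

-- ===== LEMMAS AND PROOFS =====

-- ===== VERDICT (by name: the statement is the Claim_ definition above) =====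
lemma cp_nil_left (b : List Int) : compare_points [] b = 0 := by
  cases b <;> rw [compare_points]

lemma cp_cons_nil (x : Int) (xs : List Int) : compare_points (x :: xs) [] = 1 := by
  rw [compare_points]

lemma cp_cons (x y : Int) (xs ys : List Int) :
    compare_points (x :: xs) (y :: ys) =
      if x = y then 1 + compare_points ys xs
      else if x < y then 1 + compare_points (y :: ys) xs
      else compare_points (x :: xs) ys := by
  rw [compare_points]

theorem cpAltLoop_eq (a b : List Int) (i j : Nat) (count : Int) :
    cpAltLoop a b i j count = count + compare_points (a.drop i) (b.drop j) := by
  induction a, b, i, j, count using cpAltLoop.induct with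
  | case1 a b i j count h =>
      rw [cpAltLoop, if_pos h]
      rw [List.drop_eq_getElem_cons h.1,
        show b.drop j = [] from List.drop_of_length_le (by omega), cp_cons_nil]
  | case2 a b i j count h hi =>
      rw [cpAltLoop, if_neg h, dif_pos hi]
      rw [show a.drop i = [] from List.drop_of_length_le (by omega), cp_nil_left]
      omega
  | case3 a b i j count h hi hj =>
      exact absurd ⟨not_not.mp hi, hj⟩ h
  | case4 a b i j count h hi hj heq ih =>
      have hi' := not_not.mp hi; have hj' := not_not.mp hj
      have hxy : a[i] = b[j] := by
        simpa [List.getD_eq_getElem?_getD, List.getElem?_eq_getElem hi', List.getElem?_eq_getElem hj'] using heq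
      rw [cpAltLoop, if_neg h, dif_neg hi, dif_neg hj]
      simp only [if_pos heq]
      rw [ih, List.drop_eq_getElem_cons hi', List.drop_eq_getElem_cons hj',
        cp_cons, if_pos hxy]
      ring
  | case5 a b i j count h hi hj heq hlt ih =>
      have hi' := not_not.mp hi; have hj' := not_not.mp hj
      have hxy : a[i] < b[j] := by
        simpa [List.getD_eq_getElem?_getD, List.getElem?_eq_getElem hi', List.getElem?_eq_getElem hj'] using hlt
      have hne : a[i] ≠ b[j] := ne_of_lt hxy
      rw [cpAltLoop, if_neg h, dif_neg hi, dif_neg hj]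
      simp only [if_neg heq, if_pos hlt]
      rw [ih, List.drop_eq_getElem_cons hi', List.drop_eq_getElem_cons hj',
        cp_cons, if_neg hne, if_pos hxy, ← List.drop_eq_getElem_cons hj']
      ring
  | case6 a b i j count h hi hj heq hlt ih =>
      have hi' := not_not.mp hi; have hj' := not_not.mp hj
      have hne : a[i] ≠ b[j] := by
        simp only [List.getD_eq_getElem?_getD, List.getElem?_eq_getElem hi', List.getElem?_eq_getElem hj'] at heq
        exact heq
      have hge : ¬ a[i] < b[j] := by
        simp only [List.getD_eq_getElem?_getD, List.getElem?_eq_getElem hi', List.getElem?_eq_getElem hj'] at hlt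
        exact hlt
      rw [cpAltLoop, if_neg h, dif_neg hi, dif_neg hj]
      simp only [if_neg heq, if_neg hlt]
      rw [ih, List.drop_eq_getElem_cons hi', List.drop_eq_getElem_cons hj',
        cp_cons, if_neg hne, if_neg hge, ← List.drop_eq_getElem_cons hi']

theorem compare_points_spec : Claim_equal_compare_points := by
  intro x1 x2 _
  unfold Spec_compare_points compare_points_alt
  simp [cpAltLoop_eq]
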